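-- pv_equiv track=rewrite | github.com/ayanb22/Python_Practice | Function_Practice/second_highest_digit.py | second_highest_digit
-- ===== SOURCE A (Python) =====
-- def second_highest_digit(n):
--     num = abs(n)
--     highest = -1
--     second_highest = -1
--
--     while num > 0:
--         remainder = num % 10
--         if highest < remainder:
--             second_highest = highest
--             highest = remainder
--         elif second_highest < remainder and highest != remainder:
--             second_highest = remainder
--         num = num // 10
--
--     return second_highest
-- ===== SOURCE B (Python) =====
-- def second_highest_digit(n):
--     num = abs(n)
--     digits = set()
--     while num > 0:
--         digits.add(num % 10)
--         num //= 10
--     ds = sorted(digits, reverse=True)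
--     return ds[1] if len(ds) >= 2 else -1
-- ===== Notes on version B (the rewrite author's own statement) =====
-- stated objective: simpler
-- what changed: A's incremental top-two tracking with sentinel updates is replaced by collecting the distinct digits into a set and sorting it descending, returning the second element or -1.
import Mathlib
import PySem

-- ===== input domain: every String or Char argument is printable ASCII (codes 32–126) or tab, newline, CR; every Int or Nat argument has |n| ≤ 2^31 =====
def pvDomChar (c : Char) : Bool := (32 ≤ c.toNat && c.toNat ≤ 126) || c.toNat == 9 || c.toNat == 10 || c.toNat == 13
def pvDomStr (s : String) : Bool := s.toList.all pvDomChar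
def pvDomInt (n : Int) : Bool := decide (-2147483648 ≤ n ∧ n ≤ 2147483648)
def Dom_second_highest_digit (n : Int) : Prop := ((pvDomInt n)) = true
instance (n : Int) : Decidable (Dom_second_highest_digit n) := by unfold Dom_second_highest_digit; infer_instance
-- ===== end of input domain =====

-- B replaces A's incremental top-two tracking by collecting the distinct digits into a
-- set, sorting descending and indexing — simpler to read; proved to return A's value everywhere.

-- ===== PORT A =====
-- the while loop of A; num = abs(n) ≥ 0 is carried as a Nat (num % 10 / num // 10 on a
-- nonnegative int agree with Nat.mod / Nat.div, so this is exact)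
def pvALoop (num : Nat) (highest second_highest : Int) : Int :=
  if num > 0 then
    let remainder : Int := ((num % 10 : Nat) : Int)
    if highest < remainder then
      pvALoop (num / 10) remainder highest
    else if second_highest < remainder ∧ highest ≠ remainder then
      pvALoop (num / 10) highest remainder
    else
      pvALoop (num / 10) highest second_highest
  else second_highest
termination_by num
decreasing_by all_goals exact Nat.div_lt_self (by omega) (by omega)

def second_highest_digit (n : Int) : Int := pvALoop n.natAbs (-1) (-1)

-- ===== PORT B =====
-- B's while loop: add each digit to the set
def pvBLoop (num : Nat) (digits : PySem.Set Int) : PySem.Set Int :=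
  if num > 0 then pvBLoop (num / 10) (PySem.Set.add digits ((num % 10 : Nat) : Int))
  else digits
termination_by num
decreasing_by exact Nat.div_lt_self (by omega) (by omega)

def second_highest_digit_alt (n : Int) : Int :=
  let ds := PySem.List.sorted (pvBLoop n.natAbs PySem.Set.empty) (fun x => x) true
  if ds.length ≥ 2 then (ds[1]?).getD (-1) else -1

-- ===== PRECONDITION & SPEC =====
def Spec_second_highest_digit (n : Int) (out : Int) : Prop := out = second_highest_digit_alt n
instance (n : Int) (out : Int) : Decidable (Spec_second_highest_digit n out) := by unfold Spec_second_highest_digit; infer_instance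

-- ===== CLAIM (what is proved, stated in full; the proofs are below) =====
def Claim_equal_second_highest_digit : Prop := ∀ (n : Int), Dom_second_highest_digit n → Spec_second_highest_digit n (second_highest_digit n)

-- ===== LEMMAS AND PROOFS =====

-- the list of digits of num, least significant first, as both loops visit them
def pvDigits (num : Nat) : List Int :=
  if num > 0 then ((num % 10 : Nat) : Int) :: pvDigits (num / 10) else []
termination_by num
decreasing_by exact Nat.div_lt_self (by omega) (by omega)

-- one step of A's loop as a function on the (highest, second_highest) pair
def pvStep (p : Int × Int) (r : Int) : Int × Int :=
  if p.1 < r then (r, p.1)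
  else if p.2 < r ∧ p.1 ≠ r then (p.1, r)
  else p

-- max of a list with sentinel -1, and max of the elements strictly below that max
def pvMaxD (L : List Int) : Int := L.foldl max (-1)
def pvSndD (L : List Int) : Int := (L.filter (fun x => decide (x < pvMaxD L))).foldl max (-1)

theorem pvDigits_nonneg (num : Nat) : ∀ x ∈ pvDigits num, 0 ≤ x := by
  induction num using Nat.strong_induction_on with
  | _ num ih =>
    rw [pvDigits]
    split
    · intro x hx
      rcases List.mem_cons.mp hx with h | h
      · subst h; positivity
      · exact ih (num / 10) (Nat.div_lt_self (by omega) (by omega)) x h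
    · intro x hx; simp at hx

theorem pvALoop_eq_fold (num : Nat) : ∀ h s : Int,
    pvALoop num h s = ((pvDigits num).foldl pvStep (h, s)).2 := by
  induction num using Nat.strong_induction_on with
  | _ num ih =>
    intro h s
    rw [pvALoop, pvDigits]
    split
    · have hlt : num / 10 < num := Nat.div_lt_self (by omega) (by omega)
      simp only [List.foldl_cons]
      rw [pvStep]
      split_ifs with h1 h2
      · rw [ih _ hlt]
      · rw [ih _ hlt]
      · rw [ih _ hlt]
    · simp [List.foldl]

theorem pvBLoop_eq_fold (num : Nat) : ∀ s : PySem.Set Int,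
    pvBLoop num s = (pvDigits num).foldl PySem.Set.add s := by
  induction num using Nat.strong_induction_on with
  | _ num ih =>
    intro s
    rw [pvBLoop, pvDigits]
    split
    · exact ih _ (Nat.div_lt_self (by omega) (by omega)) _
    · simp [List.foldl]

theorem mem_pvBLoop (num : Nat) (x : Int) :
    x ∈ pvBLoop num PySem.Set.empty ↔ x ∈ pvDigits num := by
  rw [pvBLoop_eq_fold, show (PySem.Set.empty : PySem.Set Int) = [] from rfl,
    ← PySem.Set.ofList_eq_foldl, PySem.Set.mem_ofList]

theorem nodup_pvBLoop (num : Nat) : (pvBLoop num PySem.Set.empty).Nodup := by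
  rw [pvBLoop_eq_fold, show (PySem.Set.empty : PySem.Set Int) = [] from rfl,
    ← PySem.Set.ofList_eq_foldl]
  exact PySem.Set.nodup_ofList _

-- characterisation of the -1-based running max
theorem pvMaxD_eq_of {L : List Int} {a : Int} (ha : a ∈ L) (hle : ∀ x ∈ L, x ≤ a)
    (h0 : -1 ≤ a) : pvMaxD L = a := by
  apply le_antisymm
  · rcases PySem.List.foldl_max_mem L (-1) with h | h
    · rw [pvMaxD, h]; exact h0
    · exact hle _ h
  · exact (PySem.List.le_foldl_max L (-1)).2 a ha

theorem pvMaxD_congr {L L' : List Int} (h : ∀ x, x ∈ L ↔ x ∈ L') : pvMaxD L = pvMaxD L' := by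
  apply le_antisymm
  · rcases PySem.List.foldl_max_mem L (-1) with hm | hm
    · rw [pvMaxD, hm]; exact (PySem.List.le_foldl_max L' (-1)).1
    · exact (PySem.List.le_foldl_max L' (-1)).2 _ ((h _).mp hm)
  · rcases PySem.List.foldl_max_mem L' (-1) with hm | hm
    · rw [pvMaxD, hm]; exact (PySem.List.le_foldl_max L (-1)).1
    · exact (PySem.List.le_foldl_max L (-1)).2 _ ((h _).mpr hm)

theorem pvSndD_congr {L L' : List Int} (h : ∀ x, x ∈ L ↔ x ∈ L') : pvSndD L = pvSndD L' := by
  have hM := pvMaxD_congr h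
  unfold pvSndD
  have : ∀ x, x ∈ L.filter (fun x => decide (x < pvMaxD L)) ↔
      x ∈ L'.filter (fun x => decide (x < pvMaxD L')) := by
    intro x
    simp only [List.mem_filter, decide_eq_true_eq, hM, h]
  exact pvMaxD_congr this

theorem pvMaxD_append (L : List Int) (r : Int) : pvMaxD (L ++ [r]) = max (pvMaxD L) r := by
  simp [pvMaxD, List.foldl_append]

-- A's fold computes exactly (max, second max below the max) with -1 sentinels
theorem pvFold_step_spec (L : List Int) : L.foldl pvStep (-1, -1) = (pvMaxD L, pvSndD L) := by
  induction L using List.reverseRecOn with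
  | nil => simp [pvMaxD, pvSndD]
  | append_singleton L r ih =>
    rw [List.foldl_append, ih]
    have hle : ∀ x ∈ L, x ≤ pvMaxD L := (PySem.List.le_foldl_max L (-1)).2
    have hSle : ∀ x ∈ L.filter (fun x => decide (x < pvMaxD L)), x ≤ pvSndD L :=
      (PySem.List.le_foldl_max _ (-1)).2
    simp only [List.foldl_cons, List.foldl_nil, pvStep]
    have hMA := pvMaxD_append L r
    split_ifs with h1 h2
    · -- pvMaxD L < r : new pair (r, pvMaxD L)
      have hmax : pvMaxD (L ++ [r]) = r := by rw [hMA]; omega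
      have hfL : L.filter (fun x => decide (x < pvMaxD (L ++ [r]))) = L := by
        apply List.filter_eq_self.mpr
        intro x hx
        simp only [decide_eq_true_eq, hmax]
        exact lt_of_le_of_lt (hle x hx) h1
      rw [Prod.ext_iff]
      constructor
      · exact hmax.symm
      · show pvMaxD L = pvSndD (L ++ [r])
        unfold pvSndD
        rw [List.filter_append, hfL]
        simp only [List.filter_cons, List.filter_nil, hmax]
        simp [pvMaxD]
    · -- r < pvMaxD L (since ¬ <, ≠), pvSndD L < r : new pair (pvMaxD L, r)
      obtain ⟨hs, hne⟩ := h2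
      have hrlt : r < pvMaxD L := by simp at h1; omega
      have hmax : pvMaxD (L ++ [r]) = pvMaxD L := by rw [hMA]; omega
      rw [Prod.ext_iff]
      constructor
      · exact hmax.symm
      · show r = pvSndD (L ++ [r])
        unfold pvSndD
        rw [List.filter_append, hmax]
        simp only [List.filter_cons, List.filter_nil, decide_eq_true_eq]
        rw [if_pos hrlt]
        rw [List.foldl_append]
        show r = max (pvSndD L) r
        omega
    · -- unchanged: r ≤ pvMaxD L and (pvSndD L ≥ r or pvMaxD L = r)
      have hrle : r ≤ pvMaxD L := by simp at h1; omega
      have hmax : pvMaxD (L ++ [r]) = pvMaxD L := by rw [hMA]; omega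
      rw [Prod.ext_iff]
      constructor
      · exact hmax.symm
      · show pvSndD L = pvSndD (L ++ [r])
        unfold pvSndD
        rw [List.filter_append, hmax]
        simp only [List.filter_cons, List.filter_nil, decide_eq_true_eq]
        by_cases heq : pvMaxD L = r
        · rw [if_neg (by omega)]; simp
        · have hrlt : r < pvMaxD L := lt_of_le_of_ne hrle (fun h => heq h.symm)
          have hsr : r ≤ pvSndD L := by
            push Not at h2
            by_contra hc
            exact heq (h2 (by omega))
          rw [if_pos hrlt, List.foldl_append]
          show pvSndD L = max (pvSndD L) r
          omega

theorem second_highest_digit_eq_sndD (n : Int) :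
    second_highest_digit n = pvSndD (pvDigits n.natAbs) := by
  rw [second_highest_digit, pvALoop_eq_fold, pvFold_step_spec]

theorem pvSorted_snd_eq (ds : List Int) (hnn : ∀ x ∈ ds, 0 ≤ x)
    (hstrict : ds.Pairwise (fun a b => b < a)) :
    (if ds.length ≥ 2 then (ds[1]?).getD (-1) else -1) = pvSndD ds := by
  match ds, hnn, hstrict with
  | [], _, _ => simp [pvSndD, pvMaxD]
  | [a], hnn, _ =>
    have ha : (0:Int) ≤ a := hnn a (by simp)
    have hmax : pvMaxD [a] = a := pvMaxD_eq_of (by simp) (by simp) (by omega)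
    simp only [List.length_cons, List.length_nil]
    rw [if_neg (by omega)]
    unfold pvSndD
    rw [hmax]
    simp
  | a :: b :: t, hnn, hstrict =>
    have hba : b < a := (List.pairwise_cons.mp hstrict).1 b (by simp)
    have hta : ∀ x ∈ t, x < a := fun x hx => (List.pairwise_cons.mp hstrict).1 x (by simp [hx])
    have htb : ∀ x ∈ t, x < b :=
      fun x hx => (List.pairwise_cons.mp (List.pairwise_cons.mp hstrict).2).1 x hx
    have hb0 : (0:Int) ≤ b := hnn b (by simp)
    have hmax : pvMaxD (a :: b :: t) = a := by
      apply pvMaxD_eq_of (by simp)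
      · intro x hx
        rcases List.mem_cons.mp hx with h | hx'
        · omega
        · rcases List.mem_cons.mp hx' with h | h
          · omega
          · exact le_of_lt (hta x h)
      · omega
    have hfil : (a :: b :: t).filter (fun x => decide (x < pvMaxD (a :: b :: t))) = b :: t := by
      rw [hmax]
      simp only [List.filter_cons, decide_eq_true_eq]
      rw [if_neg (by omega), if_pos hba]
      congr 1
      apply List.filter_eq_self.mpr
      intro x hx
      simp only [decide_eq_true_eq]
      exact hta x hx
    have hsnd : pvSndD (a :: b :: t) = b := by
      rw [pvSndD, hfil]
      exact pvMaxD_eq_of (by simp) (by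
        intro x hx
        rcases List.mem_cons.mp hx with h | h
        · omega
        · exact le_of_lt (htb x h)) (by omega)
    rw [hsnd]
    simp only [List.length_cons]
    rw [if_pos (by omega)]
    rfl

theorem second_highest_digit_spec' (n : Int) :
    second_highest_digit n = second_highest_digit_alt n := by
  rw [second_highest_digit_eq_sndD, second_highest_digit_alt]
  have hmem : ∀ x, x ∈ PySem.List.sorted (pvBLoop n.natAbs PySem.Set.empty) (fun x => x) true ↔
      x ∈ pvDigits n.natAbs := by
    intro x
    rw [PySem.List.mem_sorted]
    exact mem_pvBLoop n.natAbs x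
  have hnn : ∀ x ∈ PySem.List.sorted (pvBLoop n.natAbs PySem.Set.empty) (fun x => x) true, 0 ≤ x :=
    fun x hx => pvDigits_nonneg _ x ((hmem x).mp hx)
  have hnodup : (PySem.List.sorted (pvBLoop n.natAbs PySem.Set.empty) (fun x => x) true).Nodup :=
    ((PySem.List.sorted_perm (pvBLoop n.natAbs PySem.Set.empty) (fun x => x) true).nodup_iff).mpr
      (nodup_pvBLoop _)
  have hpair := PySem.List.sorted_pairwise_rev (pvBLoop n.natAbs PySem.Set.empty) (fun x => x)
  have hstrict : (PySem.List.sorted (pvBLoop n.natAbs PySem.Set.empty) (fun x => x) true).Pairwise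
      (fun a b => b < a) :=
    (List.Pairwise.and hpair hnodup).imp (fun h => lt_of_le_of_ne h.1 (fun hh => h.2 hh.symm))
  rw [pvSndD_congr (fun x => (hmem x).symm)]
  exact (pvSorted_snd_eq _ hnn hstrict).symm

-- ===== VERDICT (by name: the statement is the Claim_ definition above) =====
theorem second_highest_digit_spec : Claim_equal_second_highest_digit := by
  intro n _
  unfold Spec_second_highest_digit
  exact second_highest_digit_spec' n
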